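-- pv_equiv track=rewrite | github.com/cheng221/ERNIE | data_processor/steps/array_collation/processor.py | cumulative_indices_merging
-- ===== SOURCE A (Python) =====
-- def cumulative_indices_merging(x):
--     """
--     Cumulative indices merging.
--         Args:
--         x (list): input list.
--         Returns:
--         list: output list.
--     """
--     cur_cumulative_indices = []
--     tmp = 0
--     for i, indices in enumerate(x):
--         if i != 0:
--             indices = indices[1:]
--         tmp = cur_cumulative_indices[-1] if len(cur_cumulative_indices) != 0 else tmp
--         for index in indices:
--             cur_cumulative_indices.append(tmp + index)
--     return cur_cumulative_indices
-- ===== SOURCE B (Python) =====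
-- def cumulative_indices_merging(x):
--     """
--     Cumulative indices merging.
--         Args:
--         x (list): input list.
--         Returns:
--         list: output list.
--     """
--     trimmed = x[:1] + [sub[1:] for sub in x[1:]]
--     bases = []
--     b = 0
--     for t in trimmed:
--         bases.append(b)
--         if t:
--             b += t[-1]
--     return [base + v for base, t in zip(bases, trimmed) for v in t]
-- ===== Notes on version B (the rewrite author's own statement) =====
-- stated objective: alternative
-- what changed: Replaces A's single interleaved loop (base read back from the last element of the growing output list) with two separate passes: first a precomputed table of base offsets over the trimmed sublists, then an emission pass that adds each base to its sublist's elements.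
import Mathlib
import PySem

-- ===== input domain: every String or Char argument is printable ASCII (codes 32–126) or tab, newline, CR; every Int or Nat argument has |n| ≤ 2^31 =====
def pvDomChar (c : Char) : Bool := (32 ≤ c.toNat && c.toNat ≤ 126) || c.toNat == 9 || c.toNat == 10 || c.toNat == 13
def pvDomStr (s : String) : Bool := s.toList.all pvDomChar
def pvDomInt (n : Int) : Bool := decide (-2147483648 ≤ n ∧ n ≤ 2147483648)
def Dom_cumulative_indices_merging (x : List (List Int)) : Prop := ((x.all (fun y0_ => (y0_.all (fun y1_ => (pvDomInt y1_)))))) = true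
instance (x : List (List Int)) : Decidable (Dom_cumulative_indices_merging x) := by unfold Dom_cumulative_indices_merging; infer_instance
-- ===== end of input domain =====

-- B replaces A's interleaved loop (base re-read from the tail of the growing output)
-- by a precomputed base-offset table over the trimmed sublists plus a separate emission pass.

-- ===== PORT A =====
-- A's for-loop over enumerate(x) with state (cur_cumulative_indices, tmp, i).
-- cur[-1] is ported as (PySem.List.pyGet? cur (-1)).getD 0; it is only read under the len ≠ 0 guard,
-- where pyGet? returns some, so the default is never used.
def aLoop : List (List Int) → List Int → Int → Nat → List Int
  | [], cur, _, _ => cur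
  | indices :: rest, cur, tmp, i =>
    let indices' := if i ≠ 0 then indices.drop 1 else indices
    let tmp' := if cur.length ≠ 0 then (PySem.List.pyGet? cur (-1)).getD 0 else tmp
    aLoop rest (indices'.foldl (fun c index => c ++ [tmp' + index]) cur) tmp' (i + 1)

def cumulative_indices_merging (x : List (List Int)) : List Int :=
  aLoop x [] 0 0

-- ===== PORT B =====
-- B's base-table loop: bases.append(b); if t: b += t[-1]   (t[-1] read only when t is non-empty)
def bBases : List (List Int) → Int → List Int
  | [], _ => []
  | t :: ts, b => b :: bBases ts (if t ≠ [] then b + (PySem.List.pyGet? t (-1)).getD 0 else b)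

def cumulative_indices_merging_alt (x : List (List Int)) : List Int :=
  -- trimmed = x[:1] + [sub[1:] for sub in x[1:]]  (take/drop are exact for these non-negative slices)
  let trimmed := x.take 1 ++ (x.drop 1).map (fun sub => sub.drop 1)
  let bases := bBases trimmed 0
  (bases.zip trimmed).flatMap (fun p => p.2.map (fun v => p.1 + v))

-- ===== PRECONDITION & SPEC =====
def Spec_cumulative_indices_merging (x : List (List Int)) (out : List Int) : Prop := out = cumulative_indices_merging_alt x
instance (x : List (List Int)) (out : List Int) : Decidable (Spec_cumulative_indices_merging x out) := by unfold Spec_cumulative_indices_merging; infer_instance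

-- ===== CLAIM (what is proved, stated in full; the proofs are below) =====
def Claim_equal_cumulative_indices_merging : Prop := ∀ (x : List (List Int)), Dom_cumulative_indices_merging x → Spec_cumulative_indices_merging x (cumulative_indices_merging x)

-- ===== LEMMAS AND PROOFS =====

-- proof-only recursive view of B's zip/flatMap emission pass
def emit : Int → List (List Int) → List Int
  | _, [] => []
  | b, t :: ts => t.map (fun v => b + v) ++ emit (if t ≠ [] then b + t.getLast?.getD 0 else b) ts

theorem emit_eq_zip : ∀ (ts : List (List Int)) (b : Int),
    ((bBases ts b).zip ts).flatMap (fun p => p.2.map (fun v => p.1 + v)) = emit b ts := by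
  intro ts
  induction ts with
  | nil => intro b; simp [bBases, emit]
  | cons t ts ih =>
    intro b
    simp [bBases, emit, List.zip_cons_cons, List.flatMap_cons, ih,
      PySem.List.pyGet?_neg_one]

theorem getLast?_append_map (cur : List Int) (t : List Int) (b : Int) (d : Int) :
    (cur ++ t.map (fun v => b + v)).getLast?.getD d
      = if t ≠ [] then b + t.getLast?.getD 0 else cur.getLast?.getD d := by
  cases t with
  | nil => simp
  | cons a t =>
    simp only [ne_eq, reduceCtorEq, not_false_eq_true, if_pos]
    rw [List.getLast?_append_of_ne_nil cur (by simp), List.getLast?_map]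
    have hg : (a :: t).getLast? = some ((a :: t).getLast (by simp)) :=
      List.getLast?_eq_some_getLast (by simp)
    simp [hg]

theorem aLoop_eq : ∀ (rest : List (List Int)) (cur : List Int) (tmp : Int) (i : Nat),
    aLoop rest cur tmp (i + 1) = cur ++ emit (cur.getLast?.getD tmp) (rest.map (fun s => s.drop 1)) := by
  intro rest
  induction rest with
  | nil => intro cur tmp i; simp [aLoop, emit]
  | cons t rest ih =>
    intro cur tmp i
    simp only [aLoop, Nat.succ_ne_zero, ne_eq, not_false_eq_true, if_pos,
      PySem.List.foldl_append_singleton_eq_map, PySem.List.pyGet?_neg_one,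
      List.map_cons, emit]
    rcases h : cur with _ | ⟨c, cs⟩
    · simp only [List.length_nil, not_true_eq_false, if_neg, not_false_eq_true,
        List.getLast?_nil, Option.getD_none]
      rw [ih, getLast?_append_map]
      simp
    · simp only [List.length_cons, Nat.succ_ne_zero, not_false_eq_true, if_pos]
      rw [ih, getLast?_append_map]
      have hg : (c :: cs).getLast? = some ((c :: cs).getLast (by simp)) :=
        List.getLast?_eq_some_getLast (by simp)
      simp [hg, List.append_assoc]

-- ===== VERDICT (by name: the statement is the Claim_ definition above) =====
theorem cumulative_indices_merging_spec : Claim_equal_cumulative_indices_merging := by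
  intro x _
  unfold Spec_cumulative_indices_merging cumulative_indices_merging cumulative_indices_merging_alt
  rw [emit_eq_zip]
  cases x with
  | nil => simp [aLoop, emit]
  | cons s rest =>
    have h1 : aLoop (s :: rest) [] 0 0 = aLoop rest s 0 1 := by
      simp only [aLoop, PySem.List.foldl_append_singleton_eq_map, List.nil_append]
      norm_num
      have h0 : List.map (HAdd.hAdd (0:Int)) s = s := by
        have he : (HAdd.hAdd (0:Int)) = (id : Int → Int) := by funext v; simp
        rw [he, List.map_id]
      rw [h0]
    rw [h1, show (1:Nat) = 0 + 1 from rfl, aLoop_eq]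
    simp only [List.take_succ_cons, List.take_zero, List.drop_succ_cons, List.drop_zero,
      List.singleton_append, emit]
    cases s <;> simp
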